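-- pv_equiv track=rewrite | github.com/AP-MI-2021/lab-3-Paul-Marina | main.py | get_longest_digit_count_desc
-- ===== SOURCE A (Python) =====
-- def nrcifre(n):
--     """
--     Calculez nr de cifre a numarului introdus
--     :param n: numar natural
--     :return: numarul de cifre al numarului n
--     """
--     k = n
--     nr = 0
--     while k != 0:
--       k //= 10
--       nr =nr + 1
--     return nr
--
-- def get_longest_digit_count_desc(list):
--     """
--     determinare cea mai lungă subsecvență de numere ce numarul de cifre in ordine descrescatoare
--     :param list: numere naturale
--     :return: Cea mai lungă subsecvență de numere ce numarul de cifre in ordine descrescatoare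
--     """
--     l=0
--     rezul=[]
--     maxim = 0
--     for i in range(len(list)):
--         for j in range(i+1, len(list)):
--              if nrcifre(list[j-1]) > nrcifre(list[j]):
--                  if j - i + 1 > maxim:
--                      maxim = j - i + 1
--                      l = i
--              else:
--                  break
--     for i in range(l, l + maxim):
--         rezul.append(list[i])
--     return rezul
-- ===== SOURCE B (Python) =====
-- def _ndig(x):
--     return 0 if x <= 0 else 1 + _ndig(x // 10)
--
-- def get_longest_digit_count_desc(list):
--     n = len(list)
--     d = [_ndig(x) for x in list]
--     # c[i] = number of consecutive strictly-descending digit-count steps starting at i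
--     c = [0] * n
--     for i in range(n - 2, -1, -1):
--         if d[i] > d[i + 1]:
--             c[i] = c[i + 1] + 1
--     best_len = 0
--     best_start = 0
--     for i in range(n):
--         if c[i] >= 1 and c[i] + 1 > best_len:
--             best_len = c[i] + 1
--             best_start = i
--     return list[best_start:best_start + best_len]
-- ===== Notes on version B (the rewrite author's own statement) =====
-- stated objective: alternative
-- what changed: A rescans the run from every start index with the digit count recomputed for every comparison; B computes each digit count once, fills a descending-run-length array in one backward pass and picks the earliest maximum in one forward scan.
import Mathlib
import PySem

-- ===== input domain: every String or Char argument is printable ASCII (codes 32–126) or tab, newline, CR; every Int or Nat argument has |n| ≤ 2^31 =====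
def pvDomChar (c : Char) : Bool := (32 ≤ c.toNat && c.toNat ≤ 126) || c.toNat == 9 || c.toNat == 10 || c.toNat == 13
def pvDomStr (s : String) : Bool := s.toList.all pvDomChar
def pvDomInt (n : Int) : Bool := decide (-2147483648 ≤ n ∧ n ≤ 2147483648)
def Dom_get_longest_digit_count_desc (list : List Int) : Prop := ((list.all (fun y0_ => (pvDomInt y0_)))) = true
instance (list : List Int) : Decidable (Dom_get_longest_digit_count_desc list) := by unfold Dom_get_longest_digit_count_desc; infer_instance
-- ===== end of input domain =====

-- B replaces A's quadratic rescan of every start index by one backward pass that precomputes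
-- descending-run lengths (each digit count computed once), then a single forward scan.

-- ===== PORT A =====
-- while k != 0: k //= 10; nr += 1  — ported with fuel 64, exact for the nonnegative,
-- Dom-bounded (≤ 2^31, hence ≤ 10 digits) arguments admitted by Pre_.
def nrcifreAux (fuel : Nat) (k : Int) (nr : Int) : Int :=
  match fuel with
  | 0 => nr
  | f + 1 => if k ≠ 0 then nrcifreAux f (PySem.Int.floordiv k 10) (nr + 1) else nr

def nrcifre (n : Int) : Int := nrcifreAux 64 n 0

-- inner 'for j in range(i+1, len(list))' with its break; indices j-1, j are in range,
-- so list[j] is getD (exact here)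
def innerA (xs : List Int) (i : Nat) (j : Nat) (maxim l : Int) : Int × Int :=
  if j < xs.length then
    if nrcifre (xs.getD (j - 1) 0) > nrcifre (xs.getD j 0) then
      if (j : Int) - (i : Int) + 1 > maxim then innerA xs i (j + 1) ((j : Int) - (i : Int) + 1) (i : Int)
      else innerA xs i (j + 1) maxim l
    else (maxim, l)
  else (maxim, l)
termination_by xs.length - j

-- outer 'for i in range(len(list))'
def outerA (xs : List Int) (i : Nat) (maxim l : Int) : Int × Int :=
  if i < xs.length then
    outerA xs (i + 1) (innerA xs i (i + 1) maxim l).1 (innerA xs i (i + 1) maxim l).2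
  else (maxim, l)
termination_by xs.length - i

def get_longest_digit_count_desc (list : List Int) : List Int :=
  (PySem.List.pyRange (outerA list 0 0 0).2 ((outerA list 0 0 0).2 + (outerA list 0 0 0).1) 1).foldl
    (fun rezul i => rezul ++ [list.getD i.toNat 0]) []

-- ===== PORT B =====
-- return 0 if x <= 0 else 1 + _ndig(x // 10)
def ndig (x : Int) : Int :=
  if h : x ≤ 0 then 0 else 1 + ndig (PySem.Int.floordiv x 10)
termination_by x.natAbs
decreasing_by
  have hx : 0 < x := by omega
  rw [PySem.Int.floordiv_eq_ediv_of_pos (by norm_num)]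
  have h2 : 0 ≤ x / 10 := Int.ediv_nonneg (le_of_lt hx) (by norm_num)
  have h4 := Int.mul_ediv_add_emod x 10
  have h5 := Int.emod_nonneg x (by norm_num : (10:Int) ≠ 0)
  have h6 := Int.emod_lt_of_pos x (by norm_num : (0:Int) < 10)
  omega


def get_longest_digit_count_desc_alt (list : List Int) : List Int :=
  let n := list.length
  let d := list.map ndig
  -- c = [0]*n; for i in range(n-2,-1,-1): if d[i] > d[i+1]: c[i] = c[i+1]+1
  -- (every index i in the range satisfies 0 ≤ i ≤ n-2, so getD/set at i.toNat are exact)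
  let c := (PySem.List.pyRange ((n : Int) - 2) (-1) (-1)).foldl
    (fun c i => if d.getD i.toNat 0 > d.getD (i.toNat + 1) 0
                then c.set i.toNat (c.getD (i.toNat + 1) 0 + 1) else c)
    (List.replicate n 0)
  -- for i in range(n): if c[i] >= 1 and c[i]+1 > best_len: ...
  let p := (List.range n).foldl
    (fun (b : Int × Int) i =>
      if c.getD i 0 ≥ 1 ∧ c.getD i 0 + 1 > b.1 then (c.getD i 0 + 1, (i : Int)) else b)
    (0, 0)
  PySem.List.slice list (some p.2) (some (p.2 + p.1))

-- ===== PRECONDITION & SPEC =====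
-- A's digit-count loop 'k //= 10' never terminates for negative k, and with ≥ 2 elements every
-- element is fed to nrcifre, so A diverges exactly on lists of length ≥ 2 containing a negative
-- number ("numere naturale" per its docstring); Pre_ excludes exactly those inputs.
def Pre_get_longest_digit_count_desc (list : List Int) : Prop :=
  list.length ≤ 1 ∨ ∀ x ∈ list, 0 ≤ x
instance (list : List Int) : Decidable (Pre_get_longest_digit_count_desc list) := by
  unfold Pre_get_longest_digit_count_desc; infer_instance
def pvWitness_get_longest_digit_count_desc : List Int := [100, 20, 3, 4000, 300, 20, 1]

def Spec_get_longest_digit_count_desc (list : List Int) (out : List Int) : Prop := out = get_longest_digit_count_desc_alt list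
instance (list : List Int) (out : List Int) : Decidable (Spec_get_longest_digit_count_desc list out) := by unfold Spec_get_longest_digit_count_desc; infer_instance

-- ===== CLAIM (what is proved, stated in full; the proofs are below) =====
def Claim_equal_get_longest_digit_count_desc : Prop := ∀ (list : List Int), Dom_get_longest_digit_count_desc list → Pre_get_longest_digit_count_desc list → Spec_get_longest_digit_count_desc list (get_longest_digit_count_desc list)

-- ===== LEMMAS AND PROOFS =====

-- number of consecutive strictly-descending digit-count pairs (j-1,j), (j,j+1), … from position j on
def chF (xs : List Int) (j : Nat) : Nat :=
  if j < xs.length then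
    (if ndig (xs.getD (j - 1) 0) > ndig (xs.getD j 0) then chF xs (j + 1) + 1 else 0)
  else 0
termination_by xs.length - j

-- the common per-start step both programs reduce to
def Fstep (xs : List Int) (p : Int × Int) (i : Nat) : Int × Int :=
  if (1 : Int) ≤ (chF xs (i + 1) : Int) ∧ (chF xs (i + 1) : Int) + 1 > p.1
  then ((chF xs (i + 1) : Int) + 1, (i : Int)) else p

lemma nrcifreAux_eq (fuel : Nat) : ∀ (x nr : Int), 0 ≤ x → x < 10 ^ fuel →
    nrcifreAux fuel x nr = nr + ndig x := by
  induction fuel with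
  | zero =>
    intro x nr h0 h1
    have hx0 : x = 0 := by simp only [pow_zero] at h1; omega
    subst hx0
    simp [nrcifreAux, ndig]
  | succ f ih =>
    intro x nr h0 h1
    by_cases hx : x = 0
    · subst hx; simp [nrcifreAux, ndig]
    · have hxpos : 0 < x := by omega
      rw [nrcifreAux]
      simp only [hx, if_pos, ne_eq, not_false_iff, if_true]
      rw [ih (PySem.Int.floordiv x 10) (nr + 1)
            (by rw [PySem.Int.floordiv_eq_ediv_of_pos (by norm_num)]
                exact Int.ediv_nonneg h0 (by norm_num))
            (by rw [PySem.Int.floordiv_lt_iff_lt_mul (by norm_num)]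
                calc x < 10 ^ (f + 1) := h1
                  _ = 10 ^ f * 10 := by ring)]
      conv_rhs => rw [ndig, dif_neg (not_le.mpr hxpos)]
      omega

lemma nrcifre_eq_ndig (x : Int) (h0 : 0 ≤ x) (h1 : x ≤ 2147483648) : nrcifre x = ndig x := by
  have := nrcifreAux_eq 64 x 0 h0 (by norm_num; omega)
  simpa [nrcifre] using this

lemma chF_le (xs : List Int) : ∀ j, chF xs j ≤ xs.length - j := by
  intro j
  induction hk : xs.length - j generalizing j with
  | zero => rw [chF]; simp [show ¬ j < xs.length by omega]
  | succ k ih =>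
    have hj : j < xs.length := by omega
    rw [chF]
    simp only [hj, if_pos]
    split
    · have := ih (j + 1) (by omega); omega
    · omega

lemma chF_pos_lt (xs : List Int) (j : Nat) (h : 1 ≤ chF xs j) : j < xs.length := by
  by_contra hc
  rw [chF] at h
  simp [hc] at h

lemma innerA_eq (xs : List Int)
    (Hd : ∀ k, k < xs.length → nrcifre (xs.getD k 0) = ndig (xs.getD k 0)) :
    ∀ j (i : Nat) (m l : Int), i < j →
      innerA xs i j m l =
        if 1 ≤ chF xs j ∧ ((j : Int) + (chF xs j : Int) - (i : Int) > m)
        then ((j : Int) + (chF xs j : Int) - (i : Int), (i : Int))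
        else (m, l) := by
  intro j
  induction hk : xs.length - j generalizing j with
  | zero =>
    intro i m l hij
    have hj : ¬ j < xs.length := by omega
    rw [innerA, chF]
    simp [hj]
  | succ k ih =>
    intro i m l hij
    have hj : j < xs.length := by omega
    have hC : chF xs j = (if ndig (xs.getD (j - 1) 0) > ndig (xs.getD j 0)
        then chF xs (j + 1) + 1 else 0) := by rw [chF, if_pos hj]
    rw [innerA, if_pos hj, Hd (j - 1) (by omega), Hd j hj]
    by_cases hd : ndig (xs.getD (j - 1) 0) > ndig (xs.getD j 0)
    · simp only [hC, if_pos hd]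
      have hrec := fun m' l' => ih (j + 1) (by omega) i m' l' (by omega)
      set c := chF xs (j + 1) with hc
      by_cases hc1 : 1 ≤ c
      · by_cases hup : (j : Int) - (i : Int) + 1 > m
        · rw [if_pos hup, hrec, if_pos ⟨hc1, by push_cast; omega⟩,
              if_pos ⟨by omega, by push_cast; omega⟩]
          congr 1 <;> push_cast <;> ring
        · rw [if_neg hup, hrec]
          by_cases h2 : ((j : Int) + 1) + (c : Int) - (i : Int) > m
          · rw [if_pos ⟨hc1, by push_cast; push_cast at h2; omega⟩,
                if_pos ⟨by omega, by push_cast; push_cast at h2; omega⟩]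
            congr 1 <;> push_cast <;> ring
          · rw [if_neg (fun hcon => h2 (by have := hcon.2; push_cast at this ⊢; omega)),
                if_neg (fun hcon => h2 (by have := hcon.2; push_cast at this ⊢; omega))]
      · have hc0 : c = 0 := by omega
        by_cases hup : (j : Int) - (i : Int) + 1 > m
        · rw [if_pos hup, hrec, if_neg (fun hcon => hc1 hcon.1),
              if_pos ⟨by omega, by rw [hc0]; push_cast; omega⟩]
          congr 1 <;> simp only [hc0] <;> push_cast <;> ring
        · rw [if_neg hup, hrec, if_neg (fun hcon => hc1 hcon.1),
              if_neg (fun hcon => hup (by have := hcon.2; rw [hc0] at this; push_cast at this ⊢; omega))]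
    · simp only [hC, if_neg hd]
      rw [if_neg (by simp)]

lemma outerA_eq (xs : List Int)
    (Hd : ∀ k, k < xs.length → nrcifre (xs.getD k 0) = ndig (xs.getD k 0)) :
    ∀ (i : Nat) (m l : Int),
      outerA xs i m l = (List.range' i (xs.length - i)).foldl (Fstep xs) (m, l) := by
  intro i
  induction hk : xs.length - i generalizing i with
  | zero =>
    intro m l
    rw [outerA, if_neg (by omega)]
    simp
  | succ k ih =>
    intro m l
    have hi : i < xs.length := by omega
    have hp : innerA xs i (i + 1) m l = Fstep xs (m, l) i := by
      rw [innerA_eq xs Hd (i + 1) i m l (by omega), Fstep]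
      split_ifs with h1 h2
      · congr 1 <;> push_cast <;> ring
      · exfalso
        obtain ⟨ha, hb⟩ := h1
        push_cast at hb
        exact h2 ⟨by exact_mod_cast ha, by omega⟩
      · exfalso
        rename_i hcond
        obtain ⟨ha, hb⟩ := hcond
        exact h1 ⟨by exact_mod_cast ha, by push_cast; omega⟩
      · rfl
    rw [outerA, if_pos hi, hp, List.range'_succ, List.foldl_cons,
        ih (i + 1) (by omega)]

-- bounds of the fold result, for the final materialisation
lemma fold_bounds (xs : List Int) :
    ∀ (ls : List Nat) (p : Int × Int), 0 ≤ p.1 → 0 ≤ p.2 → p.2 + p.1 ≤ (xs.length : Int) →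
      0 ≤ (ls.foldl (Fstep xs) p).1 ∧ 0 ≤ (ls.foldl (Fstep xs) p).2 ∧
        (ls.foldl (Fstep xs) p).2 + (ls.foldl (Fstep xs) p).1 ≤ (xs.length : Int) := by
  intro ls
  induction ls with
  | nil => intro p h1 h2 h3; exact ⟨h1, h2, h3⟩
  | cons a tl ih =>
    intro p h1 h2 h3
    simp only [List.foldl_cons]
    by_cases hc : (1 : Int) ≤ (chF xs (a + 1) : Int) ∧ (chF xs (a + 1) : Int) + 1 > p.1
    · have ha : a + 1 < xs.length := chF_pos_lt xs (a + 1) (by exact_mod_cast hc.1)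
      have hle := chF_le xs (a + 1)
      refine ih (Fstep xs p a) ?_ ?_ ?_ <;> simp only [Fstep, if_pos hc] <;> push_cast <;> omega
    · refine ih (Fstep xs p a) ?_ ?_ ?_ <;> simp only [Fstep, if_neg hc] <;> assumption

-- [t-1, t-2, …, 0] as Ints
def dnList (t : Nat) : List Int := (List.range t).map (fun (k : Nat) => (t : Int) - 1 - (k : Int))

lemma dnList_succ (t : Nat) : dnList (t + 1) = (t : Int) :: dnList t := by
  unfold dnList
  rw [List.range_succ_eq_map]
  simp only [List.map_cons, List.map_map]
  congr 1
  · push_cast; ring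
  · apply List.map_congr_left
    intro a ha
    simp only [Function.comp]
    push_cast; ring

lemma pyRange_down (n : Nat) :
    PySem.List.pyRange ((n : Int) - 2) (-1) (-1) = dnList (n - 1) := by
  rw [PySem.List.pyRange_neg_one]
  unfold dnList
  have : ((n : Int) - 2 - -1).toNat = n - 1 := by omega
  rw [this]
  apply List.map_congr_left
  intro k hk
  simp only [List.mem_range] at hk
  push_cast
  omega

lemma getD_map_ndig (xs : List Int) (i : Nat) (h : i < xs.length) :
    (xs.map ndig).getD i 0 = ndig (xs.getD i 0) := by
  simp [List.getD_eq_getElem?_getD, h]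

lemma c_fold (xs : List Int) : ∀ (t : Nat), t + 1 ≤ xs.length →
    ∀ (c : List Int), c.length = xs.length →
      (∀ i, i < xs.length → (t ≤ i → c.getD i 0 = (chF xs (i + 1) : Int)) ∧ (i < t → c.getD i 0 = 0)) →
      ∀ i, i < xs.length →
        ((dnList t).foldl
          (fun c i => if (xs.map ndig).getD i.toNat 0 > (xs.map ndig).getD (i.toNat + 1) 0
                      then c.set i.toNat (c.getD (i.toNat + 1) 0 + 1) else c) c).getD i 0
          = (chF xs (i + 1) : Int) := by
  intro t
  induction t with
  | zero =>
    intro ht c hlen hinv i hi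
    simpa [dnList] using (hinv i hi).1 (Nat.zero_le i)
  | succ t ih =>
    intro ht c hlen hinv i hi
    rw [dnList_succ, List.foldl_cons]
    have htn : t + 1 < xs.length := by omega
    have htt : t < xs.length := by omega
    have hchf : (chF xs (t + 1) : Int) =
        (if ndig (xs.getD t 0) > ndig (xs.getD (t + 1) 0) then (chF xs (t + 2) : Int) + 1 else 0) := by
      rw [chF, if_pos htn]
      split <;> rename_i hsp
      · rw [if_pos (by simpa using hsp)]; push_cast; ring
      · rw [if_neg (by simpa using hsp)]; simp
    refine ih (by omega) _ ?_ ?_ i hi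
    · simp only [Int.toNat_natCast]
      split <;> simp [hlen]
    · intro i' hi'
      simp only [Int.toNat_natCast]
      constructor
      · intro hti'
        by_cases hde : (xs.map ndig).getD t 0 > (xs.map ndig).getD (t + 1) 0
        · rw [if_pos hde]
          by_cases hit : i' = t
          · subst hit
            rw [show (c.set i' (c.getD (i' + 1) 0 + 1)).getD i' 0 = c.getD (i' + 1) 0 + 1 by
                  simp [List.getD_eq_getElem?_getD, hlen ▸ hi']]
            rw [(hinv (i' + 1) htn).1 (by omega), hchf]
            rw [getD_map_ndig xs i' htt, getD_map_ndig xs (i' + 1) htn] at hde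
            rw [if_pos hde]
          · rw [show (c.set t (c.getD (t + 1) 0 + 1)).getD i' 0 = c.getD i' 0 by
                  simp [List.getD_eq_getElem?_getD, List.getElem?_set_ne (show t ≠ i' from fun h => hit h.symm)]]
            exact (hinv i' hi').1 (by omega)
        · rw [if_neg hde]
          by_cases hit : i' = t
          · subst hit
            rw [(hinv i' hi').2 (by omega), hchf]
            rw [getD_map_ndig xs i' htt, getD_map_ndig xs (i' + 1) htn] at hde
            rw [if_neg hde]
          · exact (hinv i' hi').1 (by omega)
      · intro hi't
        have hne : t ≠ i' := by omega
        split
        · rw [show (c.set t (c.getD (t + 1) 0 + 1)).getD i' 0 = c.getD i' 0 by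
                simp [List.getD_eq_getElem?_getD, List.getElem?_set_ne hne]]
          exact (hinv i' hi').2 (by omega)
        · exact (hinv i' hi').2 (by omega)

lemma pyRange_natCast' : ∀ (μ α : Nat), PySem.List.pyRange (α : Int) ((α : Int) + (μ : Int)) 1
    = (List.range' α μ).map (fun (k : Nat) => (k : Int)) := by
  intro μ
  induction μ with
  | zero => intro α; simp [PySem.List.pyRange]
  | succ m ih =>
    intro α
    rw [PySem.List.pyRange_one_cons (by omega), List.range'_succ, List.map_cons]
    rw [show (α : Int) + ((m + 1 : Nat) : Int) = ((α + 1 : Nat) : Int) + (m : Int) by push_cast; ring,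
        show (α : Int) + 1 = ((α + 1 : Nat) : Int) by push_cast; ring]
    rw [ih (α + 1)]

lemma map_getD_range' (xs : List Int) (α μ : Nat) (h : α + μ ≤ xs.length) :
    (List.range' α μ).map (fun (k : Nat) => xs.getD k 0) = List.take μ (List.drop α xs) := by
  apply List.ext_getElem
  · simp; omega
  · intro i h1 h2
    simp only [List.getElem_map, List.getElem_range', List.getElem_take, List.getElem_drop]
    rw [List.getD_eq_getElem]
    · congr 1; omega
    · simp at h1; omega

lemma materialize (xs : List Int) (a m : Int) (h0 : 0 ≤ a) (h1 : 0 ≤ m)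
    (h2 : a + m ≤ (xs.length : Int)) :
    (PySem.List.pyRange a (a + m) 1).foldl (fun rezul i => rezul ++ [xs.getD i.toNat 0]) []
      = PySem.List.slice xs (some a) (some (a + m)) := by
  obtain ⟨α, rfl⟩ : ∃ α : Nat, a = (α : Int) := ⟨a.toNat, by omega⟩
  obtain ⟨μ, rfl⟩ : ∃ μ : Nat, m = (μ : Int) := ⟨m.toNat, by omega⟩
  rw [PySem.List.foldl_append_singleton_eq_map, pyRange_natCast' μ α, List.map_map,
      show (α : Int) + (μ : Int) = ((α + μ : Nat) : Int) by push_cast; ring,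
      PySem.List.slice_natCast xs α (α + μ)]
  rw [show α + μ - α = μ by omega]
  rw [← map_getD_range' xs α μ (by exact_mod_cast h2)]
  apply List.map_congr_left
  intro k hk
  simp

-- ===== VERDICT (by name: the statement is the Claim_ definition above) =====
theorem get_longest_digit_count_desc_spec : Claim_equal_get_longest_digit_count_desc := by
  unfold Claim_equal_get_longest_digit_count_desc
  intro xs hdom hpre
  unfold Spec_get_longest_digit_count_desc
  by_cases hsm : xs.length ≤ 1
  · -- lists of length 0 or 1: both programs return []
    rcases xs with _ | ⟨x, _ | ⟨y, tl⟩⟩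
    · unfold get_longest_digit_count_desc get_longest_digit_count_desc_alt
      rw [outerA]
      simp [PySem.List.pyRange, PySem.List.slice]
    · unfold get_longest_digit_count_desc get_longest_digit_count_desc_alt
      rw [outerA, if_pos (by simp), innerA, outerA, if_neg (by simp)]
      simp [PySem.List.pyRange, PySem.List.slice]
    · simp at hsm
  · have hnn : ∀ x ∈ xs, 0 ≤ x := by
      rcases hpre with h | h
      · omega
      · exact h
    have hbound : ∀ x ∈ xs, x ≤ 2147483648 := by
      intro x hx
      unfold Dom_get_longest_digit_count_desc at hdom
      simp only [List.all_eq_true, pvDomInt, decide_eq_true_eq] at hdom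
      exact (hdom x hx).2
    have Hd : ∀ k, k < xs.length → nrcifre (xs.getD k 0) = ndig (xs.getD k 0) := by
      intro k hk
      rw [List.getD_eq_getElem xs 0 hk]
      exact nrcifre_eq_ndig _ (hnn _ (List.getElem_mem hk)) (hbound _ (List.getElem_mem hk))
    have hn2 : 2 ≤ xs.length := by omega
    -- the c array holds the chain lengths
    have hc : ∀ i, i < xs.length →
        ((dnList (xs.length - 1)).foldl
          (fun c i => if (xs.map ndig).getD i.toNat 0 > (xs.map ndig).getD (i.toNat + 1) 0
                      then c.set i.toNat (c.getD (i.toNat + 1) 0 + 1) else c)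
          (List.replicate xs.length 0)).getD i 0 = (chF xs (i + 1) : Int) := by
      apply c_fold xs (xs.length - 1) (by omega) _ (by simp)
      intro i hi
      constructor
      · intro hti
        have : i = xs.length - 1 := by omega
        subst this
        rw [show xs.length - 1 + 1 = xs.length by omega, chF, if_neg (by omega)]
        simp
      · intro _
        simp
    -- both sides reduce to the same Fstep fold and then materialise the same slice
    have hA : get_longest_digit_count_desc xs =
        (PySem.List.pyRange ((List.range xs.length).foldl (Fstep xs) (0, 0)).2
          (((List.range xs.length).foldl (Fstep xs) (0, 0)).2 +
           ((List.range xs.length).foldl (Fstep xs) (0, 0)).1) 1).foldl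
          (fun rezul i => rezul ++ [xs.getD i.toNat 0]) [] := by
      unfold get_longest_digit_count_desc
      rw [outerA_eq xs Hd 0 0 0, Nat.sub_zero, ← List.range_eq_range']
    have hB : get_longest_digit_count_desc_alt xs =
        PySem.List.slice xs (some ((List.range xs.length).foldl (Fstep xs) (0, 0)).2)
          (some (((List.range xs.length).foldl (Fstep xs) (0, 0)).2 +
                 ((List.range xs.length).foldl (Fstep xs) (0, 0)).1)) := by
      unfold get_longest_digit_count_desc_alt
      simp only []
      rw [pyRange_down xs.length]
      rw [PySem.List.foldl_congr_mem (List.range xs.length) _ (Fstep xs) (0, 0) ?_]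
      intro acc i hi
      simp only [List.mem_range] at hi
      rw [hc i hi, Fstep]
    rw [hA, hB]
    have hb := fold_bounds xs (List.range xs.length) (0, 0) (by simp) (by simp) (by simp)
    exact materialize xs _ _ hb.2.1 hb.1 hb.2.2
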